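-- pv_equiv track=rewrite | github.com/ParsaPNT128/quera-trainings | trainings/QT9.py | dis_calc
-- ===== SOURCE A (Python) =====
-- def dis_calc(n, a, m, o):
--     common = []
--     for i in range(min([n, m])):
--         if a[i] == o[i]:
--             common.append(a[i])
--         else:
--             for i in common:
--                 a.remove(i)
--                 o.remove(i)
--
--             return len(a) + len(o)
-- ===== SOURCE B (Python) =====
-- def dis_calc(n, a, m, o):
--     # Return-value equivalent to A (A mutates a/o via remove; B does not mutate).
--     t = min(n, m)
--     k = 0
--     while k < t and a[k] == o[k]:
--         k += 1
--     if k >= t: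
--         return None
--     return len(a) + len(o) - 2 * k
-- ===== Notes on version B (the rewrite author's own statement) =====
-- stated objective: simpler
-- what changed: B scans once for the first mismatch index k and returns len(a)+len(o)-2k directly, instead of accumulating the common prefix in a list and deleting each of its elements from both lists with list.remove; B does not mutate a/o (return-value equivalence).
import Mathlib
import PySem

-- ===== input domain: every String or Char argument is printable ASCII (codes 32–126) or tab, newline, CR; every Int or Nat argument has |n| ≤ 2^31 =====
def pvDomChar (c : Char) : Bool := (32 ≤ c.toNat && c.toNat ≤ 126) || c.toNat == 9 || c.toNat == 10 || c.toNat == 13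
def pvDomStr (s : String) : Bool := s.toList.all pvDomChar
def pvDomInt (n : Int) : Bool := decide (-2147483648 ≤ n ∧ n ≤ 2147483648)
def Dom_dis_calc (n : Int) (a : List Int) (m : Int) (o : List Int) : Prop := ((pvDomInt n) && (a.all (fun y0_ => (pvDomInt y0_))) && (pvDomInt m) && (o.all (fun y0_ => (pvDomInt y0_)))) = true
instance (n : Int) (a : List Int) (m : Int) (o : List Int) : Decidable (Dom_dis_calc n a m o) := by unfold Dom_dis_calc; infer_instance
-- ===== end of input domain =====

-- B differs from A: one scan to the first mismatch index k, result len(a)+len(o)-2k, no list mutation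
-- (A mutates a and o via list.remove; the equivalence proved here is about the RETURN value only).

-- ===== PORT A =====

-- the inner 'for i in common: a.remove(i); o.remove(i)'; none = ValueError (value not found)
def disCalcRemove (common : List Int) (ao : List Int × List Int) : Option (List Int × List Int) :=
  common.foldl
    (fun st v => st.bind (fun p =>
      match PySem.List.remove? p.1 v, PySem.List.remove? p.2 v with
      | some a', some o' => some (a', o')
      | _, _ => none))
    (some ao)

-- the 'for i in range(min([n,m]))' loop; first result layer: none = IndexError/ValueError (A raises, outside Pre_)
def disCalcLoop (a o : List Int) (common : List Int) : List Int → Option (Option Int)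
  | [] => some none                                    -- loop finished: Python falls off the end, returns None
  | i :: rest =>
    match PySem.List.pyGet? a i, PySem.List.pyGet? o i with
    | some ai, some oi =>
      if ai = oi then disCalcLoop a o (common ++ [ai]) rest
      else
        match disCalcRemove common (a, o) with
        | some (a', o') => some (some ((a'.length : Int) + (o'.length : Int)))
        | none => none
    | _, _ => none                                     -- a[i] / o[i] raises IndexError

def dis_calc (n : Int) (a : List Int) (m : Int) (o : List Int) : Option Int :=
  match PySem.List.min? [n, m] (fun y => y) with       -- min([n, m]); the list is nonempty so this is some _
  | some t => (disCalcLoop a o [] (PySem.List.pyRange 0 t 1)).getD none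
  | none => none

-- ===== PORT B =====

-- the 'while k < t and a[k] == o[k]: k += 1' loop; returns the final k
-- (when k < t but a list is exhausted, Python B raises IndexError — outside Pre_; we return k there)
def disCalcAltLoop (t : Int) : List Int → List Int → Int → Int
  | x :: xs, y :: ys, k => if k < t then (if x = y then disCalcAltLoop t xs ys (k + 1) else k) else k
  | _, _, k => k

def dis_calc_alt (n : Int) (a : List Int) (m : Int) (o : List Int) : Option Int :=
  let t := min n m
  let k := disCalcAltLoop t a o 0
  if t ≤ k then none
  else some ((a.length : Int) + (o.length : Int) - 2 * k)

-- ===== PRECONDITION & SPEC =====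
-- Pre_ excludes exactly the inputs on which A raises IndexError: min(n,m) exceeds a list's length
-- and no mismatch a[k] ≠ o[k] occurs at an index valid in both lists before min(n,m).
def Pre_dis_calc (n : Int) (a : List Int) (m : Int) (o : List Int) : Prop :=
  (min n m ≤ (a.length : Int) ∧ min n m ≤ (o.length : Int)) ∨
  (∃ k : Nat, k < min a.length o.length ∧ (k : Int) < min n m ∧ a.getD k 0 ≠ o.getD k 0)
instance (n : Int) (a : List Int) (m : Int) (o : List Int) : Decidable (Pre_dis_calc n a m o) := by
  unfold Pre_dis_calc; infer_instance

def pvWitness_dis_calc : Int × List Int × Int × List Int := (3, [1, 2, 3], 3, [1, 2, 4])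

def Spec_dis_calc (n : Int) (a : List Int) (m : Int) (o : List Int) (out : Option Int) : Prop := out = dis_calc_alt n a m o
instance (n : Int) (a : List Int) (m : Int) (o : List Int) (out : Option Int) : Decidable (Spec_dis_calc n a m o out) := by unfold Spec_dis_calc; infer_instance

-- ===== CLAIM (what is proved, stated in full; the proofs are below) =====
def Claim_equal_dis_calc : Prop := ∀ (n : Int) (a : List Int) (m : Int) (o : List Int), Dom_dis_calc n a m o → Pre_dis_calc n a m o → Spec_dis_calc n a m o (dis_calc n a m o)

-- ===== LEMMAS AND PROOFS =====

-- length of the common prefix of two lists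
def cpl : List Int → List Int → Nat
  | x :: xs, y :: ys => if x = y then cpl xs ys + 1 else 0
  | _, _ => 0

theorem cpl_le_left : ∀ (x y : List Int), cpl x y ≤ x.length := by
  intro x; induction x with
  | nil => intro y; simp [cpl]
  | cons a xs ih =>
    intro y; cases y with
    | nil => simp [cpl]
    | cons b ys => simp only [cpl]; split_ifs <;> simp [Nat.succ_le_succ (ih ys)]

theorem cpl_le_right : ∀ (x y : List Int), cpl x y ≤ y.length := by
  intro x; induction x with
  | nil => intro y; simp [cpl]
  | cons a xs ih =>
    intro y; cases y with
    | nil => simp [cpl]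
    | cons b ys => simp only [cpl]; split_ifs <;> simp [Nat.succ_le_succ (ih ys)]

theorem cpl_eq_of_lt : ∀ (x y : List Int) (j : Nat), j < cpl x y → x.getD j 0 = y.getD j 0 := by
  intro x; induction x with
  | nil => intro y j h; simp [cpl] at h
  | cons a xs ih =>
    intro y j h; cases y with
    | nil => simp [cpl] at h
    | cons b ys =>
      simp only [cpl] at h
      split_ifs at h with he
      · cases j with
        | zero => simpa using he
        | succ j' => simpa using ih ys j' (by omega)
      · omega

theorem cpl_ne : ∀ (x y : List Int), cpl x y < min x.length y.length →
    x.getD (cpl x y) 0 ≠ y.getD (cpl x y) 0 := by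
  intro x; induction x with
  | nil => intro y h; simp at h
  | cons a xs ih =>
    intro y h; cases y with
    | nil => simp at h
    | cons b ys =>
      by_cases he : a = b
      · have hc : cpl (a :: xs) (b :: ys) = cpl xs ys + 1 := by simp [cpl, he]
        rw [hc] at h ⊢
        simp only [List.getD_cons_succ]
        exact ih ys (by simp at h ⊢; omega)
      · have hc : cpl (a :: xs) (b :: ys) = 0 := by simp [cpl, he]
        rw [hc]
        simpa using he

theorem cpl_take_eq : ∀ (x y : List Int) (j : Nat), j ≤ cpl x y → x.take j = y.take j := by
  intro x; induction x with
  | nil => intro y j h; simp [cpl] at h; simp [h]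
  | cons a xs ih =>
    intro y j h; cases y with
    | nil => simp [cpl] at h; simp [h]
    | cons b ys =>
      simp only [cpl] at h
      split_ifs at h with he
      · cases j with
        | zero => simp
        | succ j' => simp [he, ih ys j' (by omega)]
      · interval_cases j; simp

-- the removal fold deletes exactly the common prefix from both lists
theorem disCalcRemove_prefix : ∀ (p ra ro : List Int),
    disCalcRemove p (p ++ ra, p ++ ro) = some (ra, ro) := by
  intro p; induction p with
  | nil => intro ra ro; simp [disCalcRemove]
  | cons v vs ih =>
    intro ra ro
    simp only [disCalcRemove, List.cons_append, List.foldl_cons, Option.bind_some]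
    have h1 : PySem.List.remove? (v :: (vs ++ ra)) v = some (vs ++ ra) := PySem.List.remove?_cons_self v (vs ++ ra)
    have h2 : PySem.List.remove? (v :: (vs ++ ro)) v = some (vs ++ ro) := PySem.List.remove?_cons_self v (vs ++ ro)
    rw [h1, h2]
    exact ih ra ro

-- closed form of B's loop: it advances to min t (k + cpl x y) (or stays at k when t ≤ k)
theorem altLoop_closed : ∀ (x y : List Int) (t k : Int),
    (cpl x y = min x.length y.length ∧ t - k ≤ (cpl x y : Int)) ∨ cpl x y < min x.length y.length →
    disCalcAltLoop t x y k = if t ≤ k then k else min t (k + cpl x y) := by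
  intro x; induction x with
  | nil =>
    intro y t k h
    have hc : cpl [] y = 0 := by cases y <;> simp [cpl]
    rcases h with ⟨_, h2⟩ | h2
    · simp [disCalcAltLoop, hc] at *; omega
    · simp [hc] at h2
  | cons a xs ih =>
    intro y t k h
    cases y with
    | nil =>
      have hc : cpl (a :: xs) [] = 0 := by simp [cpl]
      rcases h with ⟨_, h2⟩ | h2
      · simp [disCalcAltLoop, hc] at *; omega
      · simp [hc] at h2
    | cons b ys =>
      simp only [disCalcAltLoop]
      by_cases hk : k < t
      · simp only [hk, if_true]
        by_cases he : a = b
        · have hc : cpl (a :: xs) (b :: ys) = cpl xs ys + 1 := by simp [cpl, he]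
          rw [if_pos he, ih ys t (k + 1) ?_]
          · rw [hc]; split_ifs <;> push_cast <;> omega
          · rcases h with ⟨h1, h2⟩ | h2
            · left; constructor
              · rw [hc] at h1; simp at h1 ⊢; omega
              · rw [hc] at h2; push_cast at h2 ⊢; omega
            · right; rw [hc] at h2; simp at h2 ⊢; omega
        · have hc : cpl (a :: xs) (b :: ys) = 0 := by simp [cpl, he]
          rw [if_neg he, hc]; split_ifs <;> omega
      · simp only [if_neg hk]; rw [if_pos (by omega)]

-- closed form of B under Pre_
theorem alt_closed (n : Int) (a : List Int) (m : Int) (o : List Int)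
    (hpre : Pre_dis_calc n a m o) :
    dis_calc_alt n a m o =
      if min n m ≤ (cpl a o : Int) then none
      else some ((a.length : Int) + (o.length : Int) - 2 * cpl a o) := by
  have hca := cpl_le_left a o
  have hco := cpl_le_right a o
  have hside : (cpl a o = min a.length o.length ∧ min n m - 0 ≤ (cpl a o : Int)) ∨ cpl a o < min a.length o.length := by
    rcases Nat.lt_or_ge (cpl a o) (min a.length o.length) with h | h
    · right; exact h
    · have heq : cpl a o = min a.length o.length := by omega
      rcases hpre with ⟨h1, h2⟩ | ⟨k, hk1, hk2, hk3⟩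
      · left; exact ⟨heq, by simp at h1 h2 ⊢; omega⟩
      · exfalso; exact hk3 (cpl_eq_of_lt a o k (by omega))
  show (if min n m ≤ disCalcAltLoop (min n m) a o 0 then none
        else some ((a.length : Int) + (o.length : Int) - 2 * disCalcAltLoop (min n m) a o 0)) = _
  rw [altLoop_closed a o (min n m) 0 hside]
  by_cases ht : min n m ≤ (0 : Int)
  · rw [if_pos ht, if_pos ht, if_pos (show min n m ≤ (cpl a o : Int) by omega)]
  · rw [if_neg ht]
    by_cases h2 : min n m ≤ (cpl a o : Int)
    · rw [if_pos h2, if_pos (by omega)]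
    · rw [if_neg h2, if_neg (by omega)]
      have : min (min n m) (0 + (cpl a o : Int)) = (cpl a o : Int) := by omega
      rw [this]

-- A's main loop, with the invariant 'common = a.take i = o.take i'
theorem loop_closed (n : Int) (a : List Int) (m : Int) (o : List Int)
    (hpre : Pre_dis_calc n a m o) :
    ∀ (fuel : Nat) (i : Nat), i ≤ cpl a o → (min n m - i).toNat ≤ fuel →
    disCalcLoop a o (a.take i) (PySem.List.pyRange i (min n m) 1) =
      some (if min n m ≤ (cpl a o : Int) then none
            else some ((a.length : Int) + (o.length : Int) - 2 * cpl a o)) := by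
  have hca := cpl_le_left a o
  have hco := cpl_le_right a o
  intro fuel
  induction fuel with
  | zero =>
    intro i hi hf
    have hle : min n m ≤ (i : Int) := by omega
    rw [PySem.List.pyRange_one_eq_nil hle]
    simp [disCalcLoop]; omega
  | succ f ih =>
    intro i hi hf
    by_cases hit : (i : Int) < min n m
    · rw [PySem.List.pyRange_one_cons hit]
      -- i < min a.length o.length: either i < cpl, or i = cpl and Pre_ forces a mismatch in range
      have hlen : i < min a.length o.length := by
        rcases Nat.lt_or_ge i (cpl a o) with h | h
        · omega
        · have hieq : i = cpl a o := by omega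
          rcases Nat.lt_or_ge (cpl a o) (min a.length o.length) with h2 | h2
          · omega
          · exfalso
            rcases hpre with ⟨h1, h3⟩ | ⟨k, hk1, hk2, hk3⟩
            · simp at h1 h3; omega
            · exact hk3 (cpl_eq_of_lt a o k (by omega))
      have hga : PySem.List.pyGet? a (i : Int) = some a[i] :=
        PySem.List.pyGet?_ofNat a i (by omega)
      have hgo : PySem.List.pyGet? o (i : Int) = some o[i] :=
        PySem.List.pyGet?_ofNat o i (by omega)
      simp only [disCalcLoop, hga, hgo]
      by_cases heq : a[i] = o[i]
      · rw [if_pos heq]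
        have htake : a.take i ++ [a[i]] = a.take (i + 1) := by
          rw [List.take_add_one]; simp [List.getElem?_eq_getElem (by omega : i < a.length)]
        rw [htake]
        have hicpl : i + 1 ≤ cpl a o := by
          rcases Nat.lt_or_ge i (cpl a o) with h | h
          · omega
          · exfalso
            have := cpl_ne a o (by omega)
            have hieq : i = cpl a o := by omega
            rw [← hieq] at this
            exact this (by
              rw [List.getD_eq_getElem _ _ (by omega), List.getD_eq_getElem _ _ (by omega)]
              exact heq)
        exact ih (i + 1) hicpl (by omega)
      · rw [if_neg heq]
        -- mismatch: i = cpl a o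
        have hieq : i = cpl a o := by
          rcases Nat.lt_or_ge i (cpl a o) with h | h
          · exfalso
            exact heq (by
              have := cpl_eq_of_lt a o i h
              rwa [List.getD_eq_getElem _ _ (by omega), List.getD_eq_getElem _ _ (by omega)] at this)
          · omega
        have hsplit_a : a = a.take i ++ a.drop i := (List.take_append_drop i a).symm
        have hsplit_o : o = a.take i ++ o.drop i := by
          conv_lhs => rw [(List.take_append_drop i o).symm]
          rw [cpl_take_eq a o i hi]
        have hrem : disCalcRemove (a.take i) (a, o) = some (a.drop i, o.drop i) := by
          have hpair : (a, o) = (a.take i ++ a.drop i, a.take i ++ o.drop i) := by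
            rw [← hsplit_a, ← hsplit_o]
          rw [hpair]
          exact disCalcRemove_prefix (a.take i) (a.drop i) (o.drop i)
        rw [hrem]
        have hfalse : ¬ min n m ≤ (cpl a o : Int) := by omega
        rw [if_neg hfalse]
        simp only [List.length_drop]
        congr 1
        congr 1
        omega
    · rw [PySem.List.pyRange_one_eq_nil (by omega)]
      simp [disCalcLoop]
      omega

-- ===== VERDICT (by name: the statement is the Claim_ definition above) =====
theorem dis_calc_spec : Claim_equal_dis_calc := by
  intro n a m o _ hpre
  unfold Spec_dis_calc dis_calc
  have hmin : PySem.List.min? [n, m] (fun y => y) = some (min n m) := by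
    rw [PySem.List.min?_id_cons]; simp
  rw [hmin]
  show (disCalcLoop a o [] (PySem.List.pyRange 0 (min n m) 1)).getD none = dis_calc_alt n a m o
  have h0 := loop_closed n a m o hpre ((min n m - 0).toNat) 0 (by omega) le_rfl
  simp only [Nat.cast_zero, List.take_zero] at h0
  rw [h0, alt_closed n a m o hpre]
  simp
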